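-- pv_equiv track=rewrite | github.com/Izhar-Karbat/PoreDomainAnalysis | enhanced_report_generator/components/data_aggregator.py | _derive_module_from_metric
-- ===== SOURCE A (Python) =====
-- def _derive_module_from_metric(metric_name: str) -> str:
--     """
--     Derives a module name from a metric name prefix.
--
--     Args:
--         metric_name: Name of the metric
--
--     Returns:
--         Derived module name
--     """
--     prefixes = {
--         "DW_": "dw_gate_analysis",
--         "Ion_": "ion_analysis",
--         "Tyr_": "tyrosine_analysis",
--         "COM_": "core_analysis",
--         "Gyr_": "gyration_analysis",
--         "IV_": "inner_vestibule_analysis",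
--         "Pocket_": "pocket_analysis",
--         "Orient_": "orientation_contacts"
--     }
--
--     for prefix, module in prefixes.items():
--         if metric_name.startswith(prefix):
--             return module
--
--     return "unknown_module"
-- ===== SOURCE B (Python) =====
-- _MODULES = {
--     "DW": "dw_gate_analysis",
--     "Ion": "ion_analysis",
--     "Tyr": "tyrosine_analysis",
--     "COM": "core_analysis",
--     "Gyr": "gyration_analysis",
--     "IV": "inner_vestibule_analysis",
--     "Pocket": "pocket_analysis",
--     "Orient": "orientation_contacts",
-- }
--
--
-- def _derive_module_from_metric(metric_name: str) -> str:
--     head, sep, _tail = metric_name.partition('_')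
--     if not sep:
--         return "unknown_module"
--     return _MODULES.get(head, "unknown_module")
-- ===== Notes on version B (the rewrite author's own statement) =====
-- stated objective: idiomatic
-- what changed: Replaced the per-prefix startswith scan over an 8-entry dict with a single partition on the first underscore followed by one dict lookup of the bare token.
import Mathlib
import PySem

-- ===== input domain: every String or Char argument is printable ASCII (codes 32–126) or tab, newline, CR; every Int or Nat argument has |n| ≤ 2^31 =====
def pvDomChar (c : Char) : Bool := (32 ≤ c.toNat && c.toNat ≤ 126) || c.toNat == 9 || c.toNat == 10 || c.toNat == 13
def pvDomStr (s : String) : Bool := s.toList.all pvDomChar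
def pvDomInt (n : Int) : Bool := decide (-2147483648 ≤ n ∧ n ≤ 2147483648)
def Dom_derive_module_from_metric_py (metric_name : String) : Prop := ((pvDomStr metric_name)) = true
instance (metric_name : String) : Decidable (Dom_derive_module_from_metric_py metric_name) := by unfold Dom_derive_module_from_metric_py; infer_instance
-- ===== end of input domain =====

-- B replaces A's per-prefix startswith scan with one partition on the first '_' and a single dict lookup of the bare token (idiomatic; not claimed faster).


-- ===== PORT A =====
-- A's dict literal of prefixes, in insertion order
def pvPrefixesA : PySem.Dict String String := PySem.Dict.ofList
  [("DW_", "dw_gate_analysis"), ("Ion_", "ion_analysis"), ("Tyr_", "tyrosine_analysis"),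
   ("COM_", "core_analysis"), ("Gyr_", "gyration_analysis"), ("IV_", "inner_vestibule_analysis"),
   ("Pocket_", "pocket_analysis"), ("Orient_", "orientation_contacts")]

-- 'for prefix, module in prefixes.items(): if metric_name.startswith(prefix): return module', early return
def pvScanA (metric_name : String) : List (String × String) → String
  | [] => "unknown_module"
  | (prefix_, module_) :: rest =>
      if PySem.Str.startswith metric_name prefix_ then module_ else pvScanA metric_name rest

def derive_module_from_metric_py (metric_name : String) : String :=
  pvScanA metric_name pvPrefixesA.items

-- ===== PORT B =====
-- B's dict literal keyed by the bare token
def pvModulesB : PySem.Dict String String := PySem.Dict.ofList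
  [("DW", "dw_gate_analysis"), ("Ion", "ion_analysis"), ("Tyr", "tyrosine_analysis"),
   ("COM", "core_analysis"), ("Gyr", "gyration_analysis"), ("IV", "inner_vestibule_analysis"),
   ("Pocket", "pocket_analysis"), ("Orient", "orientation_contacts")]

-- str.partition('_') ported by hand (PySem has no partition): scan to the FIRST '_';
-- for a one-character separator that scan IS takeWhile/dropWhile — exact on every string.
def pvPartitionUnderscore (metric_name : String) : String × String × String :=
  let l := metric_name.toList
  if '_' ∈ l then
    (String.ofList (l.takeWhile (fun c => c ≠ '_')), "_", String.ofList ((l.dropWhile (fun c => c ≠ '_')).tail))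
  else (metric_name, "", "")

def derive_module_from_metric_py_alt (metric_name : String) : String :=
  let p := pvPartitionUnderscore metric_name
  if p.2.1 = "" then "unknown_module"
  else pvModulesB.getD p.1 "unknown_module"

-- ===== PRECONDITION & SPEC =====
def Spec_derive_module_from_metric_py (metric_name : String) (out : String) : Prop := out = derive_module_from_metric_py_alt metric_name
instance (metric_name : String) (out : String) : Decidable (Spec_derive_module_from_metric_py metric_name out) := by unfold Spec_derive_module_from_metric_py; infer_instance

-- ===== CLAIM (what is proved, stated in full; the proofs are below) =====
def Claim_equal_derive_module_from_metric_py : Prop := ∀ (metric_name : String), Dom_derive_module_from_metric_py metric_name → Spec_derive_module_from_metric_py metric_name (derive_module_from_metric_py metric_name)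

-- ===== LEMMAS AND PROOFS =====

-- startswith on 'token + "_"': the string contains '_' and its pre-'_' token is exactly p
theorem startswith_token_underscore (p : List Char) (hp : '_' ∉ p) : ∀ (l : List Char),
    (List.isPrefixOf (p ++ ['_']) l = true ↔ '_' ∈ l ∧ l.takeWhile (fun c => c ≠ '_') = p) := by
  induction p with
  | nil =>
    intro l
    cases l with
    | nil => simp
    | cons c t =>
      by_cases hc : c = '_' <;> simp [hc] <;> exact fun h => hc h.symm
  | cons a p' ih =>
    intro l
    have ha : a ≠ '_' := by intro h; exact hp (h ▸ List.mem_cons_self)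
    have hp' : '_' ∉ p' := fun h => hp (List.mem_cons_of_mem _ h)
    cases l with
    | nil => simp
    | cons c t =>
      by_cases hc : c = a
      · subst hc
        simp [ha, ih hp' t]
        intro _ h
        exact absurd h.symm ha
      · by_cases hu : c = '_'
        · subst hu
          simp [hc]
          exact fun h => absurd h.symm hc
        · simp [List.cons_append, List.isPrefixOf, List.takeWhile_cons, hu, beq_iff_eq]
          constructor
          · intro h
            exact absurd h.1.symm hc
          · intro h
            exact absurd h.2.1 hc

theorem ofList_eq_iff (tk : List Char) (b : String) : (String.ofList tk = b) ↔ tk = b.toList := by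
  constructor
  · intro h; rw [← h]; simp
  · intro h; rw [h]; simp

theorem eq_ofList_iff (tk : List Char) (b : String) : (b = String.ofList tk) ↔ tk = b.toList := by
  rw [eq_comm, ofList_eq_iff]

-- each of A's tests, in terms of B's token: p = b + "_" with no '_' in b
theorem sw_iff (m : String) (p b : String) (hb : b.toList ++ ['_'] = p.toList) (hp : '_' ∉ b.toList) :
    (PySem.Str.startswith m p = true) ↔ '_' ∈ m.toList ∧ m.toList.takeWhile (fun c => c ≠ '_') = b.toList := by
  have : PySem.Str.startswith m p = List.isPrefixOf p.toList m.toList := by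
    simp [PySem.Chars.startswith]
  rw [this, ← hb, startswith_token_underscore _ hp]

-- ===== VERDICT (by name: the statement is the Claim_ definition above) =====
theorem derive_module_from_metric_py_spec : Claim_equal_derive_module_from_metric_py := by
  intro m _
  unfold Spec_derive_module_from_metric_py derive_module_from_metric_py derive_module_from_metric_py_alt pvPartitionUnderscore
  have hitems : pvPrefixesA.items = [("DW_", "dw_gate_analysis"), ("Ion_", "ion_analysis"), ("Tyr_", "tyrosine_analysis"),
   ("COM_", "core_analysis"), ("Gyr_", "gyration_analysis"), ("IV_", "inner_vestibule_analysis"),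
   ("Pocket_", "pocket_analysis"), ("Orient_", "orientation_contacts")] := by decide
  rw [hitems]
  by_cases hu : '_' ∈ m.toList
  · simp only [pvScanA, hu, if_true]
    simp only [sw_iff m "DW_" "DW" (by decide) (by decide),
        sw_iff m "Ion_" "Ion" (by decide) (by decide),
        sw_iff m "Tyr_" "Tyr" (by decide) (by decide),
        sw_iff m "COM_" "COM" (by decide) (by decide),
        sw_iff m "Gyr_" "Gyr" (by decide) (by decide),
        sw_iff m "IV_" "IV" (by decide) (by decide),
        sw_iff m "Pocket_" "Pocket" (by decide) (by decide),
        sw_iff m "Orient_" "Orient" (by decide) (by decide), hu, true_and]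
    have hB : pvModulesB = PySem.Dict.mk
      [("DW", "dw_gate_analysis"), ("Ion", "ion_analysis"), ("Tyr", "tyrosine_analysis"),
       ("COM", "core_analysis"), ("Gyr", "gyration_analysis"), ("IV", "inner_vestibule_analysis"),
       ("Pocket", "pocket_analysis"), ("Orient", "orientation_contacts")] := by decide
    rw [hB, if_neg (by decide : ¬("_" : String) = "")]
    simp only [PySem.Dict.getD, PySem.Dict.get?_mk_cons, beq_iff_eq, eq_ofList_iff]
    split_ifs <;> simp [PySem.Dict.get?]
  · have h8 : ∀ b p : String, b.toList ++ ['_'] = p.toList → '_' ∉ b.toList → PySem.Str.startswith m p = false := by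
      intro b p hb hp
      by_contra h
      have := (sw_iff m p b hb hp).mp (by simpa using h)
      exact hu this.1
    simp only [pvScanA,
      h8 "DW" "DW_" (by decide) (by decide), h8 "Ion" "Ion_" (by decide) (by decide),
      h8 "Tyr" "Tyr_" (by decide) (by decide), h8 "COM" "COM_" (by decide) (by decide),
      h8 "Gyr" "Gyr_" (by decide) (by decide), h8 "IV" "IV_" (by decide) (by decide),
      h8 "Pocket" "Pocket_" (by decide) (by decide), h8 "Orient" "Orient_" (by decide) (by decide),
      Bool.false_eq_true, if_false]
    simp [hu]
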